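-- pv_equiv track=rewrite | github.com/tomasnyberg/cp_notebook | codeforces/1300/1307C.py | combo_breaker
-- ===== SOURCE A (Python) =====
-- def combo_breaker(s, combo):
--     firstseen = 0
--     result = 0
--     for c in s:
--         if c == combo[1]:
--             result += firstseen
--         if c == combo[0]:
--             firstseen += 1
--     return result
-- ===== SOURCE B (Python) =====
-- def combo_breaker(s, combo):
--     # two-pass: prefix-count table of combo[0], then sum it at combo[1] positions
--     pre = []
--     cnt = 0
--     for c in s:
--         pre.append(cnt)
--         cnt += (c == combo[0])
--     return sum(p for p, c in zip(pre, s) if c == combo[1])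
-- ===== Notes on version B (the rewrite author's own statement) =====
-- stated objective: alternative
-- what changed: Replaced A's single interleaved counter loop by two passes: a prefix-count table of combo[0] built first, then a sum of its entries at the positions where s[i] == combo[1].
import Mathlib
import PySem

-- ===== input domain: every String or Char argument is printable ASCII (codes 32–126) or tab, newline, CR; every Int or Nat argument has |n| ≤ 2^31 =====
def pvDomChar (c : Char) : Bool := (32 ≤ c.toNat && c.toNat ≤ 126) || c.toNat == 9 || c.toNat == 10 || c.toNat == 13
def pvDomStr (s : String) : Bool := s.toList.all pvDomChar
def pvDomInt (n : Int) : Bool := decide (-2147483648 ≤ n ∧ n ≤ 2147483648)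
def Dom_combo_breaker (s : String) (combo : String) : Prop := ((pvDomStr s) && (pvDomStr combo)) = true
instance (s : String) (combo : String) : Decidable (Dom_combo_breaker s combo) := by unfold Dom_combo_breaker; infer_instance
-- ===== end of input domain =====

-- B replaces A's single interleaved counter loop by two passes (prefix-count table, then a sum); same cost, different decomposition.

-- ===== PORT A =====
-- A's loop: state (firstseen, result); result updated from combo[1] first, then firstseen from combo[0].
def combo_breaker (s : String) (combo : String) : Int :=
  let c1 := PySem.Str.pyGet? combo 1
  let c0 := PySem.Str.pyGet? combo 0
  (s.toList.foldl (fun (st : Int × Int) c =>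
      let result := if some c = c1 then st.2 + st.1 else st.2
      let firstseen := if some c = c0 then st.1 + 1 else st.1
      (firstseen, result)) (0, 0)).2

-- ===== PORT B =====
-- first pass of Source B: the list pre of prefix counts of combo[0] (pre[i] excludes position i)
def pvAltPre (c0 : Option Char) (cs : List Char) (cnt : Int) : List Int :=
  match cs with
  | [] => []
  | c :: rest => cnt :: pvAltPre c0 rest (cnt + (if some c = c0 then 1 else 0))

def combo_breaker_alt (s : String) (combo : String) : Int :=
  let c0 := PySem.Str.pyGet? combo 0
  let c1 := PySem.Str.pyGet? combo 1
  let cs := s.toList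
  let pre := pvAltPre c0 cs 0
  (((pre.zip cs).filter (fun pc => some pc.2 = c1)).map (fun pc => pc.1)).foldl (· + ·) 0

-- ===== PRECONDITION & SPEC =====
-- Pre_ excludes exactly the inputs where A raises IndexError: a nonempty s with len(combo) < 2.
def Pre_combo_breaker (s : String) (combo : String) : Prop :=
  s = "" ∨ 2 ≤ PySem.Str.len combo
instance (s : String) (combo : String) : Decidable (Pre_combo_breaker s combo) := by unfold Pre_combo_breaker; infer_instance
def pvWitness_combo_breaker : String × String := ("aabab", "ab")

def Spec_combo_breaker (s : String) (combo : String) (out : Int) : Prop := out = combo_breaker_alt s combo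
instance (s : String) (combo : String) (out : Int) : Decidable (Spec_combo_breaker s combo out) := by unfold Spec_combo_breaker; infer_instance

-- ===== CLAIM =====
def Claim_equal_combo_breaker : Prop := ∀ (s : String) (combo : String), Dom_combo_breaker s combo → Pre_combo_breaker s combo → Spec_combo_breaker s combo (combo_breaker s combo)

-- ===== LEMMAS AND PROOFS =====

theorem pv_foldl_add_shift (l : List Int) (a : Int) :
    l.foldl (· + ·) a = a + l.foldl (· + ·) 0 := by
  induction l generalizing a with
  | nil => simp
  | cons x xs ih =>
    simp only [List.foldl_cons]
    rw [ih (a + x), ih (0 + x)]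
    ring

theorem pv_key (c0 c1 : Option Char) (cs : List Char) :
    ∀ (fs res : Int),
    (cs.foldl (fun (st : Int × Int) c =>
      let result := if some c = c1 then st.2 + st.1 else st.2
      let firstseen := if some c = c0 then st.1 + 1 else st.1
      (firstseen, result)) (fs, res)).2
    = res + ((((pvAltPre c0 cs fs).zip cs).filter (fun pc => some pc.2 = c1)).map (fun pc => pc.1)).foldl (· + ·) 0 := by
  induction cs with
  | nil => intro fs res; simp [pvAltPre]
  | cons c rest ih =>
    intro fs res
    have hpre : (if some c = c0 then fs + 1 else fs) = fs + (if some c = c0 then 1 else 0) := by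
      split_ifs <;> ring
    simp only [List.foldl_cons, pvAltPre, List.zip_cons_cons, List.filter_cons, hpre]
    by_cases h1 : some c = c1
    · simp only [h1, if_pos, decide_true, List.map_cons, List.foldl_cons]
      rw [ih, pv_foldl_add_shift _ (0 + fs)]
      ring
    · simp only [if_neg h1, decide_eq_false h1, Bool.false_eq_true, if_false]
      rw [ih]

-- ===== VERDICT =====
theorem combo_breaker_spec : Claim_equal_combo_breaker := by
  intro s combo _ _
  unfold Spec_combo_breaker combo_breaker combo_breaker_alt
  simpa using pv_key (PySem.Str.pyGet? combo 0) (PySem.Str.pyGet? combo 1) s.toList 0 0
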